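-- pv_equiv track=rewrite | github.com/hirokicodes/mtldtc | 1.py | joinArrays
-- ===== SOURCE A (Python) =====
-- def joinArrays(input1, input2):
--     subsequence_range = min(len(input1), len(input2))
--     for i in range(subsequence_range, 0, -1):
--         arr1 = input1[len(input1) - i : len(input1)]
--         arr2 = input2[0:i]
--         if arr1 == arr2:
--             res = input1[: len(input1) - i] + input2
--             return res
--     return input1 + input2
-- ===== SOURCE B (Python) =====
-- def _fall(p, pi, k, ok):
--     # slide back along the prefix-function chain until a state accepting
--     # the next character (per ok) or state 0 is reached
--     while k > 0 and not ok(k):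
--         k = pi[k - 1]
--     return k
--
--
-- def joinArrays(input1, input2):
--     n1 = len(input1)
--     n2 = len(input2)
--     # prefix function (KMP failure table) of input2
--     pi = [0] * n2
--     k = 0
--     for i in range(1, n2):
--         k = _fall(input2, pi, k, lambda j: input2[i] == input2[j])
--         if input2[i] == input2[k]:
--             k += 1
--         pi[i] = k
--     # run the KMP automaton over input1; final state k is the length of the
--     # longest prefix of input2 that is a suffix of input1
--     k = 0
--     for x in input1:
--         k = _fall(input2, pi, k, lambda j: j < n2 and x == input2[j])
--         if k < n2 and x == input2[k]:
--             k += 1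
--     return input1[:n1 - k] + input2
-- ===== Notes on version B (the rewrite author's own statement) =====
-- stated objective: faster
-- what changed: B replaces A's descending scan that slices and compares a fresh suffix/prefix pair for every candidate overlap length by the KMP prefix-function automaton: it builds input2's failure table once and runs the automaton over input1 in a single pass, the final state being the longest overlap.
import Mathlib
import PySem

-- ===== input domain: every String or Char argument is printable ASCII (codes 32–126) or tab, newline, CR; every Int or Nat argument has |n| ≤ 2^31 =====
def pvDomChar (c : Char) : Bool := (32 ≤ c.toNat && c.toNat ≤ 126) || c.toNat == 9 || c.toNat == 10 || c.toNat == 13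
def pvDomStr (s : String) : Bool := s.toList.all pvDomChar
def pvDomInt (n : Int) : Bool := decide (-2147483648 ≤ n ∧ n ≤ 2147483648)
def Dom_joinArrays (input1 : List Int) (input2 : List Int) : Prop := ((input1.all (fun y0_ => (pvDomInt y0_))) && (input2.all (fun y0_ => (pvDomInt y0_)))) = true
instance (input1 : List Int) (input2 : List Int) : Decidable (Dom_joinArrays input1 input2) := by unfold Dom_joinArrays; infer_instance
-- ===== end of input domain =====

-- B replaces A's descending scan over all candidate overlap lengths (a fresh slice
-- comparison per candidate) by the KMP prefix-function automaton: it builds the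
-- failure table of input2 and runs it once over input1, so the longest
-- suffix(input1)/prefix(input2) overlap is found in linear time
-- (objective: faster; asymptotic, O(n1*n2) worst case down to O(n1+n2)).

-- ===== PORT A =====
-- the 'for i in range(subsequence_range, 0, -1)' loop with its early return
def joinArraysGoA (input1 : List Int) (input2 : List Int) : List Int → List Int
  | [] => input1 ++ input2
  | i :: rest =>
      if PySem.List.slice input1 (some ((input1.length : Int) - i)) (some (input1.length : Int)) =
         PySem.List.slice input2 (some 0) (some i)
      then PySem.List.slice input1 none (some ((input1.length : Int) - i)) ++ input2
      else joinArraysGoA input1 input2 rest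

def joinArrays (input1 : List Int) (input2 : List Int) : List Int :=
  let subsequenceRange : Int := min (input1.length : Int) (input2.length : Int)
  joinArraysGoA input1 input2 (PySem.List.pyRange subsequenceRange 0 (-1))

-- ===== PORT B =====
-- the 'while k > 0 and not ok(k): k = pi[k-1]' helper of Source B; all values involved are
-- nonnegative Python ints, so states and table entries are carried as Nat.
-- fuel (initially the starting k) only makes the recursion structural: k strictly
-- decreases at every step because every table entry satisfies pi[j] <= j.
def fallB (pi : List Nat) (ok : Nat → Bool) : Nat → Nat → Nat
  | 0, k => k
  | fuel+1, k => if k ≠ 0 && !ok k then fallB pi ok fuel (pi.getD (k-1) 0) else k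

-- body of 'for i in range(1, n2)' building the prefix function (pi[i] = k via list set);
-- p.getD i 0 is Python's p[i]: every index used is in range
def piStepB (p : List Int) (st : List Nat × Nat) (i : Nat) : List Nat × Nat :=
  let r := fallB st.1 (fun j => p.getD i 0 == p.getD j 0) st.2 st.2
  let k := if p.getD i 0 == p.getD r 0 then r + 1 else r
  (st.1.set i k, k)

-- 'pi = [0] * n2' then the building loop; range(1, n2) = List.range' 1 (n2 - 1)
def buildPiB (p : List Int) : List Nat :=
  ((List.range' 1 (p.length - 1)).foldl (piStepB p) (List.replicate p.length 0, 0)).1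

-- body of 'for x in input1' running the automaton
def scanStepB (p : List Int) (pi : List Nat) (k : Nat) (x : Int) : Nat :=
  let r := fallB pi (fun j => decide (j < p.length) && (x == p.getD j 0)) k k
  if decide (r < p.length) && (x == p.getD r 0) then r + 1 else r

def joinArrays_alt (input1 : List Int) (input2 : List Int) : List Int :=
  let pi := buildPiB input2
  let k := input1.foldl (scanStepB input2 pi) 0
  PySem.List.slice input1 none (some ((input1.length : Int) - (k : Int))) ++ input2

-- ===== PRECONDITION & SPEC =====
def Spec_joinArrays (input1 : List Int) (input2 : List Int) (out : List Int) : Prop := out = joinArrays_alt input1 input2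
instance (input1 : List Int) (input2 : List Int) (out : List Int) : Decidable (Spec_joinArrays input1 input2 out) := by unfold Spec_joinArrays; infer_instance

-- ===== CLAIM (what is proved, stated in full; the proofs are below) =====
def Claim_equal_joinArrays : Prop := ∀ (input1 : List Int) (input2 : List Int), Dom_joinArrays input1 input2 → Spec_joinArrays input1 input2 (joinArrays input1 input2)

-- ===== LEMMAS AND PROOFS =====

-- longest (w.r.t. prefixes of p) suffix of w, as a length
def KofP (p w : List Int) : Nat := Nat.findGreatest (fun j => p.take j <:+ w) p.length

-- longest proper border of p.take t, as a length
def BordP (p : List Int) (t : Nat) : Nat := Nat.findGreatest (fun j => p.take j <:+ p.take t) (t - 1)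

lemma suffix_of_suffix_length_le {a b w : List Int} (ha : a <:+ w) (hb : b <:+ w)
    (h : a.length ≤ b.length) : a <:+ b := by
  rw [← List.reverse_prefix] at ha hb ⊢
  exact List.prefix_of_prefix_length_le ha hb (by simpa using h)

lemma concat_suffix_concat {a w : List Int} {c x : Int} :
    a ++ [c] <:+ w ++ [x] ↔ a <:+ w ∧ c = x := by
  rw [← List.reverse_prefix, ← List.reverse_prefix (l₁ := a)]
  simp [List.cons_prefix_cons, and_comm]

-- extension lemma: p.take (j+1) is a suffix of w ++ [x] iff p.take j is a suffix of w and p[j] = x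
lemma take_succ_suffix_append {p w : List Int} {x : Int} {j : Nat} (hj : j < p.length) :
    (p.take (j+1) <:+ w ++ [x]) ↔ (p.take j <:+ w ∧ p.getD j 0 = x) := by
  rw [List.take_add_one, List.getElem?_eq_getElem hj]
  simp only [Option.toList_some]
  rw [concat_suffix_concat, List.getD_eq_getElem?_getD, List.getElem?_eq_getElem hj]
  simp

lemma fg_congr {P Q : Nat → Prop} [DecidablePred P] [DecidablePred Q] (n : Nat)
    (h : ∀ j, j ≤ n → (P j ↔ Q j)) : Nat.findGreatest P n = Nat.findGreatest Q n := by
  induction n with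
  | zero => rfl
  | succ n ih =>
    rw [Nat.findGreatest_succ, Nat.findGreatest_succ, ih (fun j hj => h j (by omega))]
    by_cases hp : P (n+1)
    · rw [if_pos hp, if_pos ((h (n+1) le_rfl).1 hp)]
    · rw [if_neg hp, if_neg (fun hq => hp ((h (n+1) le_rfl).2 hq))]

lemma fg_shrink {P : Nat → Prop} [DecidablePred P] {m n : Nat} (hmn : m ≤ n)
    (h : ∀ j, m < j → j ≤ n → ¬P j) : Nat.findGreatest P n = Nat.findGreatest P m := by
  induction n with
  | zero => simp [Nat.le_zero.mp hmn]
  | succ n ih =>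
    rcases Nat.lt_or_ge m (n+1) with hlt | hge
    · rw [Nat.findGreatest_succ, if_neg (h (n+1) hlt le_rfl)]
      exact ih (by omega) (fun j h1 h2 => h j h1 (by omega))
    · have : m = n + 1 := by omega
      subst this; rfl

lemma bordP_le (p : List Int) (t : Nat) : BordP p t ≤ t - 1 := Nat.findGreatest_le _

lemma bordP_suffix (p : List Int) (t : Nat) : p.take (BordP p t) <:+ p.take t := by
  rcases Nat.eq_zero_or_pos (BordP p t) with h | h
  · simp [h]
  · have hiff := (Nat.findGreatest_eq_iff (P := fun j => p.take j <:+ p.take t)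
      (k := t - 1) (m := BordP p t)).1 rfl
    exact hiff.2.1 (by omega)

lemma bordP_greatest {p : List Int} {t j : Nat} (hjt : j < t)
    (hs : p.take j <:+ p.take t) : j ≤ BordP p t := by
  by_contra hc
  exact Nat.findGreatest_is_greatest (lt_of_not_ge hc) (by omega) hs

lemma length_take_eq {p : List Int} {j : Nat} (h : j ≤ p.length) :
    (p.take j).length = j := by simp [h]

-- a proper border of p.take t is a border of p.take (BordP p t)
lemma bordP_chain {p : List Int} {t j : Nat} (ht : t ≤ p.length) (hjt : j < t)
    (hs : p.take j <:+ p.take t) : j ≤ BordP p t ∧ p.take j <:+ p.take (BordP p t) := by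
  have hle : j ≤ BordP p t := bordP_greatest hjt hs
  refine ⟨hle, suffix_of_suffix_length_le hs (bordP_suffix p t) ?_⟩
  rw [length_take_eq (by omega), length_take_eq (by have := bordP_le p t; omega)]
  exact hle

-- the while-loop: descending the border chain from k computes the greatest j ≤ k that
-- is a border of p.take k and satisfies ok (or 0 when none does)
lemma fallB_eq (p : List Int) (pi : List Nat) (ok : Nat → Bool) :
    ∀ fuel k, k ≤ fuel → k ≤ p.length →
    (∀ j, j < k → pi.getD j 0 = BordP p (j+1)) →
    fallB pi ok fuel k =
      Nat.findGreatest (fun j => ok j = true ∧ p.take j <:+ p.take k) k := by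
  intro fuel
  induction fuel with
  | zero =>
    intro k hk _ _
    interval_cases k
    simp [fallB]
  | succ fuel ih =>
    intro k hkf hkp hpi
    cases k with
    | zero => simp [fallB]
    | succ k' =>
      by_cases hok : ok (k'+1) = true
      · rw [fallB, if_neg (by simp [hok])]
        rw [Nat.findGreatest_succ, if_pos ⟨hok, List.suffix_refl _⟩]
      · rw [fallB, if_pos (by simp [hok])]
        simp only [Nat.add_sub_cancel]
        have hb := bordP_le p (k'+1)
        simp only [Nat.add_sub_cancel] at hb
        have hrec := ih (pi.getD k' 0) (by rw [hpi k' (by omega)]; omega)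
          (by rw [hpi k' (by omega)]; omega)
          (fun j hj => hpi j (by rw [hpi k' (by omega)] at hj; omega))
        rw [hrec, hpi k' (by omega)]
        rw [Nat.findGreatest_succ, if_neg (by rintro ⟨h1, _⟩; exact hok h1)]
        rw [fg_shrink (m := BordP p (k'+1)) (n := k') hb (fun j h1 h2 => by
          rintro ⟨hoj, hsj⟩
          have hc := bordP_chain (p := p) (t := k'+1) (j := j) hkp (by omega) hsj
          omega)]
        exact fg_congr _ (fun j hj => by
          constructor
          · rintro ⟨hoj, hsj⟩
            exact ⟨hoj, hsj.trans (bordP_suffix p (k'+1))⟩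
          · rintro ⟨hoj, hsj⟩
            have hc := bordP_chain (p := p) (t := k'+1) (j := j) hkp (by omega) hsj
            exact ⟨hoj, hc.2⟩)

lemma take_succ_getD {p : List Int} {i : Nat} (hi : i < p.length) :
    p.take (i+1) = p.take i ++ [p.getD i 0] := by
  rw [List.take_add_one, List.getElem?_eq_getElem hi, List.getD_eq_getElem?_getD,
    List.getElem?_eq_getElem hi]
  rfl

lemma kofP_suffix (p w : List Int) : p.take (KofP p w) <:+ w := by
  rcases Nat.eq_zero_or_pos (KofP p w) with h | h
  · simp [h]
  · have hiff := (Nat.findGreatest_eq_iff (P := fun j => p.take j <:+ w)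
      (k := p.length) (m := KofP p w)).1 rfl
    exact hiff.2.1 (by omega)

lemma kofP_le (p w : List Int) : KofP p w ≤ p.length := Nat.findGreatest_le _

lemma kofP_greatest {p w : List Int} {j : Nat} (hj : j ≤ p.length)
    (hs : p.take j <:+ w) : j ≤ KofP p w := by
  by_contra hc
  exact Nat.findGreatest_is_greatest (lt_of_not_ge hc) hj hs

lemma KofP_nil (p : List Int) : KofP p [] = 0 := by
  rw [KofP, Nat.findGreatest_eq_zero_iff]
  intro j hj0 hjl hs
  have := hs.length_le
  rw [length_take_eq hjl] at this
  simp at this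
  omega

lemma KofP_le_length (p w : List Int) : KofP p w ≤ w.length := by
  have := (kofP_suffix p w).length_le
  rwa [length_take_eq (kofP_le p w)] at this

-- the shared KMP step: from the longest p-prefix suffix k of W, sliding down the border
-- chain and extending by one character computes the longest p-prefix suffix of W ++ [x]
lemma kmp_step_core (p W : List Int) (x : Int) (k N : Nat) (ok : Nat → Bool)
    (hk : k ≤ p.length) (hN : N ≤ p.length)
    (hsuf : p.take k <:+ W)
    (hmax : ∀ j, j < N → j ≤ p.length → p.take j <:+ W → j ≤ k)
    (hok : ∀ j, j ≤ k → (ok j = true ↔ (j < p.length ∧ p.getD j 0 = x)))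
    (hON : ∀ j, j ≤ k → ok j = true → j + 1 ≤ N) :
    (if ok (Nat.findGreatest (fun j => ok j = true ∧ p.take j <:+ p.take k) k) = true
     then Nat.findGreatest (fun j => ok j = true ∧ p.take j <:+ p.take k) k + 1
     else Nat.findGreatest (fun j => ok j = true ∧ p.take j <:+ p.take k) k) =
      Nat.findGreatest (fun j => p.take j <:+ W ++ [x]) N := by
  set r := Nat.findGreatest (fun j => ok j = true ∧ p.take j <:+ p.take k) k with hrdef
  have hrk : r ≤ k := Nat.findGreatest_le _
  have hrP : r ≠ 0 → (ok r = true ∧ p.take r <:+ p.take k) := by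
    intro h0
    exact ((Nat.findGreatest_eq_iff (P := fun j => ok j = true ∧ p.take j <:+ p.take k)
      (k := k) (m := r)).1 rfl).2.1 h0
  have hbridge : ∀ j, j ≤ k → p.take j <:+ W → p.take j <:+ p.take k := by
    intro j hj hs
    exact suffix_of_suffix_length_le hs hsuf (by
      rw [length_take_eq (by omega), length_take_eq hk]; exact hj)
  have hrW : p.take r <:+ W := by
    rcases Nat.eq_zero_or_pos r with h | h
    · simp [h]
    · exact ((hrP (by omega)).2).trans hsuf
  by_cases hokr : ok r = true
  · rw [if_pos hokr]
    have hrlen : r < p.length := ((hok r hrk).1 hokr).1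
    have hrx : p.getD r 0 = x := ((hok r hrk).1 hokr).2
    symm
    rw [Nat.findGreatest_eq_iff]
    refine ⟨hON r hrk hokr, fun _ => ?_, ?_⟩
    · exact (take_succ_suffix_append hrlen).2 ⟨hrW, hrx⟩
    · intro j hj1 hj2 hs
      have hj0 : 0 < j := by omega
      have hl : j - 1 < p.length := by omega
      have hj' : j - 1 + 1 = j := by omega
      rw [← hj'] at hs
      have hext := (take_succ_suffix_append hl).1 hs
      have hlk : j - 1 ≤ k := hmax (j-1) (by omega) (by omega) hext.1
      have hokl : ok (j-1) = true := (hok (j-1) hlk).2 ⟨hl, hext.2⟩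
      have hler : j - 1 ≤ r := by
        by_contra hc
        exact Nat.findGreatest_is_greatest (lt_of_not_ge hc) hlk
          ⟨hokl, hbridge _ hlk hext.1⟩
      omega
  · rw [if_neg hokr]
    have hr0 : r = 0 := by
      by_contra h0
      exact hokr (hrP h0).1
    rw [hr0]
    symm
    rw [Nat.findGreatest_eq_zero_iff]
    intro j hj0 hjN hs
    have hl : j - 1 < p.length := by omega
    have hj' : j - 1 + 1 = j := by omega
    rw [← hj'] at hs
    have hext := (take_succ_suffix_append hl).1 hs
    have hlk : j - 1 ≤ k := hmax (j-1) (by omega) (by omega) hext.1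
    have hokl : ok (j-1) = true := (hok (j-1) hlk).2 ⟨hl, hext.2⟩
    have hler : j - 1 ≤ r := by
      by_contra hc
      exact Nat.findGreatest_is_greatest (lt_of_not_ge hc) hlk
        ⟨hokl, hbridge _ hlk hext.1⟩
    have hj1 : j - 1 = 0 := by omega
    rw [hj1] at hokl
    rw [hr0] at hokr
    exact hokr hokl

-- one automaton step advances the longest-overlap invariant
lemma scanStepB_spec (p : List Int) (pi : List Nat)
    (hpi : ∀ j, j < p.length → pi.getD j 0 = BordP p (j+1))
    (w : List Int) (x : Int) :
    scanStepB p pi (KofP p w) x = KofP p (w ++ [x]) := by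
  have hk : KofP p w ≤ p.length := kofP_le p w
  simp only [scanStepB]
  rw [fallB_eq p pi _ (KofP p w) (KofP p w) le_rfl hk (fun j hj => hpi j (by omega))]
  have hcore := kmp_step_core p w x (KofP p w) p.length
    (fun j => decide (j < p.length) && (x == p.getD j 0)) hk le_rfl
    (kofP_suffix p w)
    (fun j hj1 hj2 hs => kofP_greatest hj2 hs)
    (fun j hj => by
      rw [Bool.and_eq_true, decide_eq_true_eq, beq_iff_eq]
      exact ⟨fun h => ⟨h.1, h.2.symm⟩, fun h => ⟨h.1, h.2.symm⟩⟩)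
    (fun j hj hok => by rw [Bool.and_eq_true, decide_eq_true_eq] at hok; omega)
  rw [KofP]
  exact hcore

-- correctness of the prefix-function construction
lemma piLoop_inv (p : List Int) (cnt : Nat) (hcnt : cnt ≤ p.length - 1) :
    ((List.range' 1 cnt).foldl (piStepB p) (List.replicate p.length 0, 0)).1.length = p.length ∧
    ((List.range' 1 cnt).foldl (piStepB p) (List.replicate p.length 0, 0)).2 = BordP p (cnt+1) ∧
    (∀ j, j ≤ cnt →
      ((List.range' 1 cnt).foldl (piStepB p) (List.replicate p.length 0, 0)).1.getD j 0 =
        BordP p (j+1)) := by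
  induction cnt with
  | zero =>
    refine ⟨by simp, by simp [BordP], ?_⟩
    intro j hj
    have hj0 : j = 0 := by omega
    subst hj0
    simp [BordP, List.getD_eq_getElem?_getD]
  | succ cnt ih =>
    have hcnt' : cnt ≤ p.length - 1 := by omega
    obtain ⟨hlen, hk, hent⟩ := ih hcnt'
    set st := (List.range' 1 cnt).foldl (piStepB p) (List.replicate p.length 0, 0) with hst
    have hi : cnt + 1 < p.length := by omega
    rw [List.range'_concat, List.foldl_append]
    simp only [List.foldl_cons, List.foldl_nil, ← hst]
    have hb := bordP_le p (cnt+1)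
    simp only [Nat.add_sub_cancel] at hb
    -- the fall inside piStepB
    have hfall : fallB st.1 (fun j => p.getD (cnt+1) 0 == p.getD j 0)
        (BordP p (cnt+1)) (BordP p (cnt+1)) =
        Nat.findGreatest (fun j => (p.getD (cnt+1) 0 == p.getD j 0) = true ∧
          p.take j <:+ p.take (BordP p (cnt+1))) (BordP p (cnt+1)) := by
      have h := fallB_eq p st.1 (fun j => p.getD (cnt+1) 0 == p.getD j 0) st.2 st.2
        le_rfl (by rw [hk]; omega)
        (fun j hj => hent j (by rw [hk] at hj; omega))
      rw [hk] at h
      exact h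
    have honen : 1 + 1 * cnt = cnt + 1 := by omega
    have hcore := kmp_step_core p (p.take (cnt+1)) (p.getD (cnt+1) 0) (BordP p (cnt+1))
      (cnt+1) (fun j => p.getD (cnt+1) 0 == p.getD j 0)
      (by omega) (by omega)
      (bordP_suffix p (cnt+1))
      (fun j hj1 hj2 hs => bordP_greatest hj1 hs)
      (fun j hj => by
        rw [beq_iff_eq]
        exact ⟨fun h => ⟨by omega, h.symm⟩, fun h => h.2.symm⟩)
      (fun j hj _ => by omega)
    rw [← take_succ_getD hi] at hcore
    have hBsucc : BordP p (cnt+1+1) =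
        Nat.findGreatest (fun j => p.take j <:+ p.take (cnt+1+1)) (cnt+1) := by
      rw [BordP, Nat.add_sub_cancel]
    have hknew : (piStepB p st (1 + 1 * cnt)).2 = BordP p (cnt+2) := by
      simp only [piStepB, honen, hk, hfall]
      rw [show (cnt + 2) = (cnt+1+1) from rfl, hBsucc]
      exact hcore
    refine ⟨?_, hknew, ?_⟩
    · rw [piStepB]; simpa using hlen
    · intro j hj
      rcases Nat.lt_or_ge j (cnt+1) with hlt | hge
      · rw [piStepB]
        simp only [List.getD_eq_getElem?_getD, List.getElem?_set_ne (by omega : 1 + 1 * cnt ≠ j)]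
        rw [← List.getD_eq_getElem?_getD]
        exact hent j (by omega)
      · have hj' : j = cnt + 1 := by omega
        subst hj'
        have hset : (piStepB p st (1 + 1 * cnt)).1.getD (cnt+1) 0 =
            (piStepB p st (1 + 1 * cnt)).2 := by
          rw [piStepB]
          simp only [honen, List.getD_eq_getElem?_getD]
          rw [List.getElem?_set_self (by rw [hlen]; omega)]
          rfl
        rw [hset, hknew]

lemma buildPiB_spec (p : List Int) :
    ∀ j, j < p.length → (buildPiB p).getD j 0 = BordP p (j+1) := by
  intro j hj
  have h := piLoop_inv p (p.length - 1) le_rfl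
  rw [buildPiB]
  exact h.2.2 j (by omega)

-- the automaton fold over input1 maintains the longest-overlap invariant
lemma scanFold (p : List Int) (pi : List Nat)
    (hpi : ∀ j, j < p.length → pi.getD j 0 = BordP p (j+1)) :
    ∀ (l w : List Int), l.foldl (scanStepB p pi) (KofP p w) = KofP p (w ++ l) := by
  intro l
  induction l with
  | nil => intro w; simp
  | cons x rest ih =>
    intro w
    rw [List.foldl_cons, scanStepB_spec p pi hpi w x, ih (w ++ [x])]
    simp

-- A's descending loop finds the greatest matching overlap length
lemma goA_eq (input1 input2 : List Int) (m : Nat) (hm1 : m ≤ input1.length)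
    (hm2 : m ≤ input2.length) :
    joinArraysGoA input1 input2 (PySem.List.pyRange (m : Int) 0 (-1)) =
      input1.take (input1.length -
        Nat.findGreatest (fun j => input2.take j <:+ input1) m) ++ input2 := by
  induction m with
  | zero =>
    rw [PySem.List.pyRange_neg_one_eq_nil (by omega)]
    simp [joinArraysGoA]
  | succ m ih =>
    rw [show ((m+1 : Nat) : Int) = ((m:Int)+1) by push_cast; ring,
      PySem.List.pyRange_neg_one_cons (by omega)]
    have hstep : ((m:Int) + 1 - 1) = (m : Int) := by ring
    rw [hstep, joinArraysGoA]
    have e1 : PySem.List.slice input1 (some ((input1.length : Int) - ((m:Int)+1)))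
        (some (input1.length : Int)) = input1.drop (input1.length - (m+1)) := by
      rw [PySem.List.slice_toNat _ (by omega) (by omega)]
      have h1 : (((input1.length : Int) - ((m:Int)+1))).toNat = input1.length - (m+1) := by omega
      have h2 : ((input1.length : Int)).toNat = input1.length := by omega
      rw [h1, h2]
      apply List.take_of_length_le
      simp [List.length_drop]
    have e2 : PySem.List.slice input2 (some 0) (some ((m:Int)+1)) = input2.take (m+1) := by
      rw [PySem.List.slice_zero_start, show ((m:Int)+1) = ((m+1 : Nat) : Int) by push_cast; ring,
        PySem.List.slice_to_natCast]
    rw [e1, e2, Nat.findGreatest_succ]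
    by_cases hc : input2.take (m+1) <:+ input1
    · have heq : input1.drop (input1.length - (m+1)) = input2.take (m+1) := by
        rw [List.suffix_iff_eq_drop] at hc
        rw [hc, length_take_eq (by omega)]
      rw [if_pos heq, if_pos hc]
      rw [PySem.List.slice_to _ (by omega)]
      congr 1
      congr 1
      omega
    · have hne : input1.drop (input1.length - (m+1)) ≠ input2.take (m+1) := by
        intro h
        exact hc (h ▸ List.drop_suffix _ _)
      rw [if_neg hne, if_neg hc]
      exact ih (by omega) (by omega)

-- ===== VERDICT (by name: the statement is the Claim_ definition above) =====
theorem joinArrays_spec : Claim_equal_joinArrays := by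
  intro input1 input2 _
  unfold Spec_joinArrays
  simp only [joinArrays, joinArrays_alt]
  have hmin : min ((input1.length : Int)) ((input2.length : Int)) =
      ((min input1.length input2.length : Nat) : Int) := by omega
  rw [hmin, goA_eq input1 input2 (min input1.length input2.length) (by omega) (by omega)]
  have hfold : input1.foldl (scanStepB input2 (buildPiB input2)) 0 = KofP input2 input1 := by
    have h := scanFold input2 (buildPiB input2) (buildPiB_spec input2) input1 []
    rw [KofP_nil] at h
    simpa using h
  rw [hfold]
  have hKle : KofP input2 input1 ≤ input1.length := KofP_le_length _ _
  have hfg : Nat.findGreatest (fun j => input2.take j <:+ input1)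
      (min input1.length input2.length) = KofP input2 input1 := by
    rw [KofP]
    rcases Nat.lt_or_ge input1.length input2.length with h | h
    · rw [min_eq_left (by omega)]
      symm
      apply fg_shrink (by omega)
      intro j h1 h2 hs
      have := hs.length_le
      rw [length_take_eq h2] at this
      omega
    · rw [min_eq_right (by omega)]
  rw [hfg, PySem.List.slice_to _ (by omega)]
  have htn : (((input1.length : Int) - (KofP input2 input1 : Int))).toNat =
      input1.length - KofP input2 input1 := by omega
  rw [htn]
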